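-- pv_equiv track=rewrite | github.com/pascal-sun/domain_in_scope | domain_in_scope.py | IPs_from_octet_range
-- ===== SOURCE A (Python) =====
-- def IPs_from_octet_range(ip: str) -> list[str]:
--     res = []
--     ip_octet = [[0, 0], [0, 0], [0, 0], [0, 0]]
--     octets = ip.split(".")
--
--     for i, octet in enumerate(octets):
--         if "-" in octet:
--             ip_octet[i][0] = int(octet.split("-")[0])
--             ip_octet[i][1] = int(octet.split("-")[1])
--         else:
--             ip_octet[i][0] = int(octet)
--             ip_octet[i][1] = int(octet)
--
--     for i in range (ip_octet[0][0], ip_octet[0][1] + 1):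
--         for j in range (ip_octet[1][0], ip_octet[1][1] + 1):
--             for k in range (ip_octet[2][0], ip_octet[2][1] + 1):
--                 for l in range (ip_octet[3][0], ip_octet[3][1] + 1):
--                     res.append(f"{i}.{j}.{k}.{l}")
--
--     return res
-- ===== SOURCE B (Python) =====
-- def IPs_from_octet_range(ip: str) -> list[str]:
--     bounds = [[0, 0], [0, 0], [0, 0], [0, 0]]
--     for i, octet in enumerate(ip.split(".")):
--         if "-" in octet:
--             parts = octet.split("-")
--             bounds[i] = [int(parts[0]), int(parts[1])]
--         else:
--             bounds[i] = [int(octet), int(octet)]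
--     combos = [[]]
--     for lo, hi in bounds:
--         combos = [c + [v] for c in combos for v in range(lo, hi + 1)]
--     return [".".join(str(v) for v in c) for c in combos]
-- ===== Notes on version B (the rewrite author's own statement) =====
-- stated objective: alternative
-- what changed: A's four nested range loops appending formatted strings are replaced by a single fold that extends partial octet tuples one range level at a time ([[]] -> all prefixes) and dot-joins each 4-tuple at the end; the parsing loop is kept.
import Mathlib
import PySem

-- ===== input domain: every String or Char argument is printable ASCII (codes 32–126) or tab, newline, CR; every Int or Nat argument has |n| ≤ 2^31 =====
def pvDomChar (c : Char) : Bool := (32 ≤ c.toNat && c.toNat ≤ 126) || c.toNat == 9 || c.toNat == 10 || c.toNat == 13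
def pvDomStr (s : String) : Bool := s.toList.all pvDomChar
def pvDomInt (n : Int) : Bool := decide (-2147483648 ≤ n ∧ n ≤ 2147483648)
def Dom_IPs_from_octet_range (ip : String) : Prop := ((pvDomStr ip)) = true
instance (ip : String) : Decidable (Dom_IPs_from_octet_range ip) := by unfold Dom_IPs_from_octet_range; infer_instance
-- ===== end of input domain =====

-- B replaces A's four nested range loops by one fold that extends partial octet tuples level
-- by level and joins them at the end (objective: alternative decomposition; same output order).
-- A mutates no argument; equivalence is about the return value.

-- ===== PORT A =====
-- one step of A's parsing loop: 'ip_octet[i][0] = …; ip_octet[i][1] = …' (.getD 0 / pyGetD "" only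
-- reached where Python raises ValueError/IndexError, excluded by Pre_)
def pvParseA (st : List (Int × Int)) (p : Int × String) : List (Int × Int) :=
  let i := p.1
  let octet := p.2
  if PySem.Str.isIn "-" octet then
    let lo := (PySem.Int.ofStr? (PySem.List.pyGetD ((PySem.Str.split? octet "-").getD []) 0 "")).getD 0
    let hi := (PySem.Int.ofStr? (PySem.List.pyGetD ((PySem.Str.split? octet "-").getD []) 1 "")).getD 0
    st.set i.toNat (lo, hi)
  else
    let v := (PySem.Int.ofStr? octet).getD 0
    st.set i.toNat (v, v)

-- the f-string f"{i}.{j}.{k}.{l}", built at the char level (Lean's String.append is kernel-opaque)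
def pvFmtA (i j k l : Int) : String :=
  String.ofList (PySem.Int.toChars i ++ '.' :: PySem.Int.toChars j ++ '.' :: PySem.Int.toChars k
    ++ '.' :: PySem.Int.toChars l)

def IPs_from_octet_range (ip : String) : List String :=
  let octets := (PySem.Str.split? ip ".").getD []
  let ipo := (PySem.List.enumerate octets 0).foldl pvParseA [(0,0),(0,0),(0,0),(0,0)]
  let b0 := PySem.List.pyGetD ipo 0 (0,0)
  let b1 := PySem.List.pyGetD ipo 1 (0,0)
  let b2 := PySem.List.pyGetD ipo 2 (0,0)
  let b3 := PySem.List.pyGetD ipo 3 (0,0)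
  (PySem.List.pyRange b0.1 (b0.2 + 1) 1).foldl (fun res i =>
    (PySem.List.pyRange b1.1 (b1.2 + 1) 1).foldl (fun res j =>
      (PySem.List.pyRange b2.1 (b2.2 + 1) 1).foldl (fun res k =>
        (PySem.List.pyRange b3.1 (b3.2 + 1) 1).foldl (fun res l =>
          res ++ [pvFmtA i j k l]) res) res) res) []

-- ===== PORT B =====
-- one step of B's parsing loop: 'bounds[i] = [int(parts[0]), int(parts[1])]' (same defaults as A's)
def pvParseB (st : List (Int × Int)) (p : Int × String) : List (Int × Int) :=
  let i := p.1
  let octet := p.2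
  if PySem.Str.isIn "-" octet then
    let parts := (PySem.Str.split? octet "-").getD []
    st.set i.toNat ((PySem.Int.ofStr? (PySem.List.pyGetD parts 0 "")).getD 0,
                    (PySem.Int.ofStr? (PySem.List.pyGetD parts 1 "")).getD 0)
  else
    st.set i.toNat ((PySem.Int.ofStr? octet).getD 0, (PySem.Int.ofStr? octet).getD 0)

def IPs_from_octet_range_alt (ip : String) : List String :=
  let bounds := (PySem.List.enumerate ((PySem.Str.split? ip ".").getD []) 0).foldl pvParseB
    [(0,0),(0,0),(0,0),(0,0)]
  let combos := bounds.foldl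
    (fun cs b => cs.flatMap (fun c => (PySem.List.pyRange b.1 (b.2 + 1) 1).map (fun v => c ++ [v])))
    ([[]] : List (List Int))
  combos.map (fun c => PySem.Str.join "." (c.map PySem.Int.toStr))

-- ===== PRECONDITION & SPEC =====
-- Pre_ = exactly the inputs where Python A returns (B raises on the same inputs): at most 4 dot-separated
-- parts (else IndexError) and every part int()-parseable (the first two dash-separated pieces when a dash
-- occurs, else the part itself; else ValueError)
def Pre_IPs_from_octet_range (ip : String) : Prop :=
  ((PySem.Str.split? ip ".").getD []).length ≤ 4 ∧
  ∀ o ∈ (PySem.Str.split? ip ".").getD [],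
    if PySem.Str.isIn "-" o then
      (PySem.Int.ofStr? (PySem.List.pyGetD ((PySem.Str.split? o "-").getD []) 0 "")).isSome = true ∧
      (PySem.Int.ofStr? (PySem.List.pyGetD ((PySem.Str.split? o "-").getD []) 1 "")).isSome = true
    else (PySem.Int.ofStr? o).isSome = true
instance (ip : String) : Decidable (Pre_IPs_from_octet_range ip) := by
  unfold Pre_IPs_from_octet_range; infer_instance

def pvWitness_IPs_from_octet_range : String := "1.2-3.4.5"

def Spec_IPs_from_octet_range (ip : String) (out : List String) : Prop := out = IPs_from_octet_range_alt ip
instance (ip : String) (out : List String) : Decidable (Spec_IPs_from_octet_range ip out) := by unfold Spec_IPs_from_octet_range; infer_instance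

-- ===== CLAIM (what is proved, stated in full; the proofs are below) =====
def Claim_equal_IPs_from_octet_range : Prop := ∀ (ip : String), Dom_IPs_from_octet_range ip → Pre_IPs_from_octet_range ip → Spec_IPs_from_octet_range ip (IPs_from_octet_range ip)

-- ===== LEMMAS AND PROOFS =====

theorem pvParse_eq : pvParseA = pvParseB := by
  funext st p
  simp [pvParseA, pvParseB]

theorem pvFmt_eq (i j k l : Int) :
    PySem.Str.join "." [PySem.Int.toStr i, PySem.Int.toStr j, PySem.Int.toStr k, PySem.Int.toStr l]
      = pvFmtA i j k l := by
  apply String.toList_inj.mp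
  simp [pvFmtA, PySem.Str.toList_join, PySem.Chars.join_cons_cons, PySem.Chars.join_singleton,
    PySem.Int.toList_toStr]

theorem pvCore (L0 L1 L2 L3 : List Int) :
    L0.foldl (fun res i =>
      L1.foldl (fun res j =>
        L2.foldl (fun res k =>
          L3.foldl (fun res l => res ++ [pvFmtA i j k l]) res) res) res) [] =
    ([L0, L1, L2, L3].foldl (fun cs L => cs.flatMap (fun c => L.map (fun v => c ++ [v])))
      ([[]] : List (List Int))).map (fun c => PySem.Str.join "." (c.map PySem.Int.toStr)) := by
  simp only [PySem.List.foldl_append_singleton_eq_map, PySem.List.foldl_append_eq_flatMap,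
    List.foldl_cons, List.foldl_nil]
  simp [List.map_flatMap, List.flatMap_map, List.flatMap_assoc, List.map_map, Function.comp_def,
    pvFmt_eq]

theorem pvParse_length (octs : List (Int × String)) (st : List (Int × Int)) :
    (octs.foldl pvParseA st).length = st.length := by
  induction octs generalizing st with
  | nil => rfl
  | cons o os ih => simp only [List.foldl_cons, ih, pvParseA]; split <;> simp

-- ===== VERDICT (by name: the statement is the Claim_ definition above) =====
theorem IPs_from_octet_range_spec : Claim_equal_IPs_from_octet_range := by
  intro ip _ _
  unfold Spec_IPs_from_octet_range
  simp only [IPs_from_octet_range, IPs_from_octet_range_alt, ← pvParse_eq]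
  obtain ⟨a, b, c, d, h⟩ := List.length_eq_four.mp
    (pvParse_length (PySem.List.enumerate ((PySem.Str.split? ip ".").getD []) 0)
      [(0,0),(0,0),(0,0),(0,0)])
  rw [h]
  simp only [PySem.List.pyGetD]
  rw [pvCore]
  simp [PySem.List.pyIdx?]
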